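-- pv_equiv track=rewrite | github.com/jaywoong-jeong/ScandalClassify | src/scandalclassify/grouping/greedy.py | greedy_assignment
-- ===== SOURCE A (Python) =====
-- from typing import List, Tuple
--
-- def greedy_assignment(n: int, k: int, l: int) -> Tuple[List[list[int]], list[int]]:
--     verification_count = [0] * n
--     batches: List[list[int]] = []
--     while any(v < k for v in verification_count):
--         current_batch: list[int] = []
--         for i in sorted(range(n), key=lambda x: verification_count[x]):
--             if verification_count[i] < k and i not in current_batch:
--                 current_batch.append(i)
--                 if len(current_batch) >= l:
--                     break
--         if not current_batch:
--             break
--         batches.append(current_batch)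
--         for i in current_batch:
--             verification_count[i] += 1
--     return batches, verification_count
-- ===== SOURCE B (Python) =====
-- def greedy_assignment(n, k, l):
--     # Closed form: the greedy process is round-robin over 0..n-1, k passes,
--     # cut into chunks of size min(max(l,1), n); counts all end at k.
--     if n <= 0 or k <= 0:
--         return [], [0] * n
--     cap = min(max(l, 1), n)
--     total = n * k
--     batches = []
--     p = 0
--     while p < total:
--         s = min(cap, total - p)
--         batches.append([(p + j) % n for j in range(s)])
--         p += s
--     return batches, [k] * n
-- ===== Notes on version B (the rewrite author's own statement) =====
-- stated objective: faster
-- what changed: B replaces A's simulation (re-sorting all n indices by count for every batch) by the closed form of the schedule: the greedy choice is provably round-robin, so B emits chunks of size min(max(l,1),n) cut from the k-fold cycle 0..n-1 and returns counts [k]*n directly, with no sorting and no count array.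
import Mathlib
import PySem

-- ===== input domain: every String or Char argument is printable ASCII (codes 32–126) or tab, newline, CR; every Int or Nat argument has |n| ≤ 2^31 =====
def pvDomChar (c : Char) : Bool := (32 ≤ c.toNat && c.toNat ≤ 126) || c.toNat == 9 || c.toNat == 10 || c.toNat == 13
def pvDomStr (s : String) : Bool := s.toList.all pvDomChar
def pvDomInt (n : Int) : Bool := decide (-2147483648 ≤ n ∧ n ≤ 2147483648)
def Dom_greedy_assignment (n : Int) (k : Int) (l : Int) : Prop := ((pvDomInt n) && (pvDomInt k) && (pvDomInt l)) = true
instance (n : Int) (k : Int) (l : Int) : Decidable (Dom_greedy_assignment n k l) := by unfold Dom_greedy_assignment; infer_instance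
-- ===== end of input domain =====

-- B replaces A's repeated sort-and-scan simulation by the closed round-robin form of the same
-- schedule (the k-fold cycle 0..n-1 cut into chunks of size min(max(l,1),n)); equal output proved.

-- ===== PORT A =====
-- verification_count[i] += 1  (Python list element assignment; i is always a valid index here)
def pvIncr (vc : List Int) (i : Int) : List Int :=
  PySem.List.pySetD vc i (PySem.List.pyGetD vc i 0 + 1)

-- the inner 'for i in sorted(…)' loop, with A's conditions and breaks in source order
def pvInner (vc : List Int) (k l : Int) : List Int → List Int → List Int
  | [], cb => cb
  | i :: rest, cb =>
    if PySem.List.pyGetD vc i 0 < k ∧ ¬ cb.contains i then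
      (if l ≤ ((cb ++ [i]).length : Int) then cb ++ [i] else pvInner vc k l rest (cb ++ [i]))
    else pvInner vc k l rest cb

-- the 'while any(v < k …)' loop; fuel n.toNat*k.toNat+1 is proved sufficient below
def pvOuter (n k l : Int) : Nat → List Int → List (List Int) → List (List Int) × List Int
  | 0, vc, batches => (batches, vc)
  | fuel+1, vc, batches =>
    if vc.any (fun v => decide (v < k)) then
      let cb := pvInner vc k l (PySem.List.sorted (PySem.List.pyRange 0 n) (fun x => PySem.List.pyGetD vc x 0)) []
      if cb = [] then (batches, vc)
      else pvOuter n k l fuel (cb.foldl pvIncr vc) (batches ++ [cb])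
    else (batches, vc)

def greedy_assignment (n : Int) (k : Int) (l : Int) : List (List Int) × List Int :=
  pvOuter n k l (n.toNat * k.toNat + 1) (List.replicate n.toNat 0) []

-- ===== PORT B =====
-- Source B's 'while p < total' loop; fuel (n*k).toNat is proved sufficient (each step advances p by ≥ 1)
def pvChunks (n cap total : Int) : Nat → Int → List (List Int)
  | 0, _ => []
  | fuel+1, p =>
    if p < total then
      ((PySem.List.pyRange 0 (min cap (total - p))).map (fun j => PySem.Int.mod (p + j) n))
        :: pvChunks n cap total fuel (p + min cap (total - p))
    else []

def greedy_assignment_alt (n : Int) (k : Int) (l : Int) : List (List Int) × List Int :=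
  if n ≤ 0 ∨ k ≤ 0 then ([], List.replicate n.toNat 0)
  else (pvChunks n (min (max l 1) n) (n * k) (n * k).toNat 0, List.replicate n.toNat k)

-- ===== PRECONDITION & SPEC =====
def Spec_greedy_assignment (n : Int) (k : Int) (l : Int) (out : List (List Int) × List Int) : Prop := out = greedy_assignment_alt n k l
instance (n : Int) (k : Int) (l : Int) (out : List (List Int) × List Int) : Decidable (Spec_greedy_assignment n k l out) := by unfold Spec_greedy_assignment; infer_instance

-- ===== CLAIM (what is proved, stated in full; the proofs are below) =====
def Claim_equal_greedy_assignment : Prop := ∀ (n : Int) (k : Int) (l : Int), Dom_greedy_assignment n k l → Spec_greedy_assignment n k l (greedy_assignment n k l)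

-- ===== LEMMAS AND PROOFS =====

-- the verification_count list after p = q*n + r round-robin picks
def stateVec (n q r : Int) : List Int :=
  (PySem.List.pyRange 0 n).map (fun i => if i < r then q + 1 else q)

theorem stateVec_zero (n q : Int) (_hn : 0 ≤ n) : stateVec n q 0 = List.replicate n.toNat q := by
  rw [List.eq_replicate_iff]
  refine ⟨by simp [stateVec, PySem.List.length_pyRange_one], ?_⟩
  intro b hb
  simp only [stateVec, List.mem_map] at hb
  obtain ⟨i, hi, rfl⟩ := hb
  rw [PySem.List.mem_pyRange_one] at hi
  simp [not_lt.mpr hi.1]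

theorem stateVec_wrap (n q : Int) : stateVec n q n = stateVec n (q + 1) 0 := by
  unfold stateVec
  apply List.map_congr_left
  intro i hi
  rw [PySem.List.mem_pyRange_one] at hi
  simp [hi.2]
  omega

theorem any_stateVec_true (n q r k : Int) (h0 : 0 ≤ r) (hr : r < n) (hq : q < k) :
    (stateVec n q r).any (fun v => decide (v < k)) = true := by
  rw [List.any_eq_true]
  refine ⟨q, ?_, by simpa using hq⟩
  simp only [stateVec, List.mem_map]
  exact ⟨r, PySem.List.mem_pyRange_one.mpr ⟨h0, hr⟩, by simp⟩

theorem any_stateVec_false (n k : Int) :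
    (stateVec n k 0).any (fun v => decide (v < k)) = false := by
  rw [List.any_eq_false]
  intro x hx
  simp only [stateVec, List.mem_map] at hx
  obtain ⟨i, hi, rfl⟩ := hx
  rw [PySem.List.mem_pyRange_one] at hi
  simp [not_lt.mpr hi.1]

theorem length_stateVec (n q r : Int) : (stateVec n q r).length = n.toNat := by
  simp [stateVec, PySem.List.length_pyRange_one]

theorem getD_stateVec (n q r x : Int) (h0 : 0 ≤ x) (hx : x < n) :
    PySem.List.pyGetD (stateVec n q r) x 0 = if x < r then q + 1 else q :=
  PySem.List.pyGetD_map_pyRange_of_nonneg _ n x 0 h0 hx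

theorem pvIncr_step (n q r : Int) (h0 : 0 ≤ r) (hr : r < n) :
    pvIncr (stateVec n q r) r = stateVec n q (r + 1) := by
  have hcast : ((n.toNat : Int)) = n := Int.toNat_of_nonneg (by omega)
  have hset : pvIncr (stateVec n q r) r = (stateVec n q r).set r.toNat (q + 1) := by
    unfold pvIncr
    rw [getD_stateVec n q r r h0 hr, if_neg (lt_irrefl r)]
    simp only [PySem.List.pySetD, PySem.List.pySet?, PySem.List.pyIdx?, length_stateVec, hcast,
      if_pos h0, if_pos hr]
    rfl
  rw [hset]
  apply List.ext_getElem
  · simp [length_stateVec]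
  · intro j hj1 hj2
    rw [List.getElem_set]
    have hjlt : j < (PySem.List.pyRange 0 n).length := by
      rw [PySem.List.length_pyRange_one]
      have := hj2
      rw [length_stateVec] at this
      omega
    simp only [stateVec, List.getElem_map, PySem.List.getElem_pyRange_one]
    have hjn : (j : Int) < n := by
      rw [PySem.List.length_pyRange_one] at hjlt; omega
    split_ifs <;> omega

theorem foldl_pvIncr_aux (n q : Int) :
    ∀ (d : Nat) (r m : Int), (m - r).toNat = d → 0 ≤ r → r ≤ m → m ≤ n →
      (PySem.List.pyRange r m).foldl pvIncr (stateVec n q r) = stateVec n q m := by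
  intro d
  induction d with
  | zero =>
    intro r m hd h0 hrm hmn
    have hmr : m = r := by omega
    subst hmr
    rw [PySem.List.pyRange_one_eq_nil le_rfl]
    rfl
  | succ d ih =>
    intro r m hd h0 hrm hmn
    have hrm' : r < m := by omega
    rw [PySem.List.pyRange_one_cons hrm']
    rw [List.foldl_cons, pvIncr_step n q r h0 (by omega)]
    exact ih (r + 1) m (by omega) (by omega) (by omega) hmn

theorem foldl_pvIncr (n q r m : Int) (h0 : 0 ≤ r) (hrm : r ≤ m) (hmn : m ≤ n) :
    (PySem.List.pyRange r m).foldl pvIncr (stateVec n q r) = stateVec n q m :=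
  foldl_pvIncr_aux n q (m - r).toNat r m rfl h0 hrm hmn

theorem chunk_no_wrap (n q r s : Int) (h0 : 0 ≤ r) (hn : 0 < n) (_hs : 0 ≤ s) (hrs : r + s ≤ n) :
    (PySem.List.pyRange 0 s).map (fun j => PySem.Int.mod (q * n + r + j) n)
      = PySem.List.pyRange r (r + s) := by
  apply List.ext_getElem
  · simp [PySem.List.length_pyRange_one]
  · intro j hj1 hj2
    have hjs : (j : Int) < s := by
      simp only [List.length_map, PySem.List.length_pyRange_one] at hj1; omega
    simp only [List.getElem_map, PySem.List.getElem_pyRange_one, zero_add]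
    rw [PySem.Int.mod_eq_emod_of_pos hn]
    have he : q * n + r + (j : Int) = (r + j) + n * q := by ring
    rw [he, Int.add_mul_emod_self_left, Int.emod_eq_of_lt (by omega) (by omega)]

theorem chunk_wrap (n q r s : Int) (_h0 : 0 ≤ r) (hrn : r < n) (hsn : s ≤ n) (hrs : n < r + s) :
    (PySem.List.pyRange 0 s).map (fun j => PySem.Int.mod (q * n + r + j) n)
      = PySem.List.pyRange r n ++ PySem.List.pyRange 0 (r + s - n) := by
  have hn : (0:Int) < n := by omega
  rw [PySem.List.pyRange_one_append 0 (n - r) s (by omega) (by omega), List.map_append]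
  congr 1
  · apply List.ext_getElem
    · simp [PySem.List.length_pyRange_one]
    · intro j hj1 hj2
      have hjs : (j : Int) < n - r := by
        simp only [List.length_map, PySem.List.length_pyRange_one] at hj1; omega
      simp only [List.getElem_map, PySem.List.getElem_pyRange_one, zero_add]
      rw [PySem.Int.mod_eq_emod_of_pos hn]
      have he : q * n + r + (j : Int) = (r + j) + n * q := by ring
      rw [he, Int.add_mul_emod_self_left, Int.emod_eq_of_lt (by omega) (by omega)]
  · apply List.ext_getElem
    · simp [PySem.List.length_pyRange_one]; omega
    · intro j hj1 hj2
      have hjs : (j : Int) < s - (n - r) := by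
        simp only [List.length_map, PySem.List.length_pyRange_one] at hj1; omega
      simp only [List.getElem_map, PySem.List.getElem_pyRange_one, zero_add]
      rw [PySem.Int.mod_eq_emod_of_pos hn]
      have he : q * n + r + ((n - r) + (j : Int)) = (j : Int) + n * (q + 1) := by ring
      rw [he, Int.add_mul_emod_self_left, Int.emod_eq_of_lt (by omega) (by omega)]

theorem insertBy_middle (before : Int → Int → Bool) (x : Int) :
    ∀ (as bs : List Int), (∀ a ∈ as, before x a = false) →
      PySem.List.insertBy before x (as ++ bs) = as ++ PySem.List.insertBy before x bs := by
  intro as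
  induction as with
  | nil => intro bs _; simp
  | cons a as ih =>
    intro bs h
    simp only [List.cons_append, PySem.List.insertBy, h a (by simp)]
    simp only [Bool.false_eq_true, if_false, List.cons.injEq, true_and]
    exact ih bs (fun a ha => h a (by simp [ha]))

theorem sorted_stateVec (n q r : Int) (h0 : 0 ≤ r) (hrn : r ≤ n) :
    PySem.List.sorted (PySem.List.pyRange 0 n) (fun x => PySem.List.pyGetD (stateVec n q r) x 0)
      = PySem.List.pyRange r n ++ PySem.List.pyRange 0 r := by
  rw [PySem.List.sorted_eq_foldl_insertBy]
  set key : Int → Int := fun x => PySem.List.pyGetD (stateVec n q r) x 0 with hkey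
  set before : Int → Int → Bool := fun a b => decide (key a < key b) with hbefore
  have hkeyval : ∀ x : Int, 0 ≤ x → x < n → key x = if x < r then q + 1 else q := by
    intro x hx0 hxn; exact getD_stateVec n q r x hx0 hxn
  have main : ∀ (m : Nat), (m : Int) ≤ n →
      (PySem.List.pyRange 0 (m : Int)).foldl (fun acc x => PySem.List.insertBy before x acc) []
        = PySem.List.pyRange r (m : Int) ++ PySem.List.pyRange 0 (min (m : Int) r) := by
    intro m
    induction m with
    | zero =>
      intro _
      simp only [Nat.cast_zero]
      rw [PySem.List.pyRange_one_eq_nil le_rfl]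
      rw [PySem.List.pyRange_one_eq_nil (by omega), PySem.List.pyRange_one_eq_nil (by omega)]
      rfl
    | succ m ih =>
      intro hm
      have hm' : (m : Int) ≤ n := by push_cast at hm ⊢; omega
      have hsplit : PySem.List.pyRange 0 ((m : Nat) + 1 : Int) = PySem.List.pyRange 0 (m : Int) ++ [(m : Int)] := by
        have := PySem.List.pyRange_one_succ_right (a := 0) (b := (m : Int)) (by positivity)
        exact_mod_cast this
      rw [show (((m + 1 : Nat) : Int)) = ((m : Int) + 1) by push_cast; ring] at *
      rw [hsplit, List.foldl_append, ih hm', List.foldl_cons, List.foldl_nil]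
      by_cases hmr : (m : Int) < r
      · -- key m = q + 1; everything so far also q + 1 (all elements < m ≤ r); append at end
        have hrm : PySem.List.pyRange r (m : Int) = [] := PySem.List.pyRange_one_eq_nil (by omega)
        have hrm' : PySem.List.pyRange r ((m : Int) + 1) = [] := PySem.List.pyRange_one_eq_nil (by omega)
        rw [hrm, List.nil_append, hrm', List.nil_append]
        rw [min_eq_left (by omega), min_eq_left (by omega)]
        rw [PySem.List.insertBy_of_forall_not_before]
        · exact (PySem.List.pyRange_one_succ_right (by omega)).symm
        · intro y hy
          rw [PySem.List.mem_pyRange_one] at hy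
          rw [hbefore]
          simp only [decide_eq_false_iff_not, not_lt]
          rw [hkeyval (m : Int) (by positivity) (by omega), hkeyval y (by omega) (by omega)]
          simp only [if_pos hmr, if_pos (show y < r by omega)]
          omega
      · -- key m = q: goes after the q-block (pyRange r m), before the (q+1)-block (pyRange 0 r)
        rw [not_lt] at hmr
        rw [min_eq_right (by omega), min_eq_right (by omega)]
        rw [insertBy_middle]
        · rw [show PySem.List.pyRange r ((m : Int) + 1) = PySem.List.pyRange r (m : Int) ++ [(m : Int)] from PySem.List.pyRange_one_succ_right (by omega)]
          rw [List.append_assoc]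
          congr 1
          by_cases hr0 : r = 0
          · subst hr0
            rw [PySem.List.pyRange_one_eq_nil le_rfl]
            rfl
          · rw [PySem.List.pyRange_one_cons (by omega)]
            rw [show PySem.List.insertBy before (m:Int) (0 :: PySem.List.pyRange (0+1) r) =
                  if before (m:Int) 0 then (m:Int) :: 0 :: PySem.List.pyRange (0+1) r
                  else 0 :: PySem.List.insertBy before (m:Int) (PySem.List.pyRange (0+1) r) from rfl]
            rw [if_pos ?pos]
            case pos =>
              rw [hbefore]
              simp only [decide_eq_true_eq]
              rw [hkeyval (m : Int) (by positivity) (by omega), hkeyval 0 le_rfl (by omega)]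
              rw [if_neg (by omega), if_pos (by omega)]
              omega
            rfl
        · intro a ha
          rw [PySem.List.mem_pyRange_one] at ha
          rw [hbefore]
          simp only [decide_eq_false_iff_not, not_lt]
          rw [hkeyval (m : Int) (by positivity) (by omega), hkeyval a (by omega) (by omega)]
          rw [if_neg (by omega), if_neg (by omega)]
  have hfin := main n.toNat (by omega)
  rw [Int.toNat_of_nonneg (by omega)] at hfin
  rw [hfin, min_eq_right hrn]

theorem pvInner_skip (vc : List Int) (k l : Int) :
    ∀ (os cb : List Int), (∀ i ∈ os, ¬ PySem.List.pyGetD vc i 0 < k) → pvInner vc k l os cb = cb := by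
  intro os
  induction os with
  | nil => intro cb _; rfl
  | cons i os ih =>
    intro cb h
    have : ¬ (PySem.List.pyGetD vc i 0 < k ∧ ¬ cb.contains i) := by
      intro hc; exact h i (by simp) hc.1
    simp only [pvInner, if_neg this]
    exact ih cb (fun j hj => h j (by simp [hj]))

theorem pvInner_take (vc : List Int) (k l : Int) (bad : List Int)
    (hbad : ∀ i ∈ bad, ¬ PySem.List.pyGetD vc i 0 < k) :
    ∀ (good cb : List Int), good.Nodup → (∀ i ∈ good, PySem.List.pyGetD vc i 0 < k) →
      (∀ i ∈ good, i ∉ cb) → cb.length < (max l 1).toNat →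
      pvInner vc k l (good ++ bad) cb = cb ++ good.take ((max l 1).toNat - cb.length) := by
  intro good
  induction good with
  | nil =>
    intro cb _ _ _ _
    rw [List.nil_append, pvInner_skip vc k l bad cb hbad]
    simp
  | cons i good ih =>
    intro cb hnd hgood hcb hlen
    have hkey : PySem.List.pyGetD vc i 0 < k := hgood i (by simp)
    have hmem : ¬ (cb.contains i = true) := by
      rw [List.contains_iff_mem]; exact hcb i (by simp)
    simp only [List.cons_append, pvInner, if_pos (And.intro hkey hmem)]
    have hlen1 : ((cb ++ [i]).length : Int) = (cb.length : Int) + 1 := by simp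
    by_cases hbrk : l ≤ ((cb ++ [i]).length : Int)
    · rw [if_pos hbrk]
      have : (max l 1).toNat - cb.length = 1 := by
        rw [hlen1] at hbrk; omega
      rw [this]
      simp
    · rw [if_neg hbrk]
      have hlt : (cb ++ [i]).length < (max l 1).toNat := by
        rw [hlen1] at hbrk
        simp only [List.length_append, List.length_cons, List.length_nil]
        omega
      rw [ih (cb ++ [i]) (List.Nodup.of_cons hnd) (fun j hj => hgood j (by simp [hj]))
          ?fresh hlt]
      case fresh =>
        intro j hj
        simp only [List.mem_append, List.mem_singleton]
        rintro (hjc | rfl)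
        · exact hcb j (by simp [hj]) hjc
        · exact (List.nodup_cons.mp hnd).1 hj
      rw [List.append_assoc]
      congr 1
      have hsucc : (max l 1).toNat - cb.length = ((max l 1).toNat - (cb ++ [i]).length) + 1 := by
        simp only [List.length_append, List.length_cons, List.length_nil]
        omega
      rw [hsucc]
      simp

theorem take_pyRange (a b : Int) (t : Nat) (hab : a ≤ b) :
    (PySem.List.pyRange a b).take t = PySem.List.pyRange a (min (a + t) b) := by
  apply List.ext_getElem
  · simp [PySem.List.length_pyRange_one]; omega
  · intro j h1 h2
    simp only [List.getElem_take, PySem.List.getElem_pyRange_one]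

theorem pvChunks_stop (n cap total p : Int) (h : ¬ p < total) :
    ∀ fuel, pvChunks n cap total fuel p = [] := by
  intro fuel
  cases fuel with
  | zero => rfl
  | succ f => simp [pvChunks, h]

-- closes one loop step once the new state is in normalized coordinates

theorem pvStep_close (n k l : Int) (fuel : Nat)
    (IH : ∀ (p q r : Int) (fuelB : Nat) (batches : List (List Int)),
      p = q * n + r → 0 ≤ r → r < n → 0 ≤ q → p ≤ n * k →
      (n * k - p).toNat < fuel → (n * k - p).toNat ≤ fuelB →
      pvOuter n k l fuel (stateVec n q r) batches
        = (batches ++ pvChunks n (min (max l 1) n) (n * k) fuelB p, List.replicate n.toNat k))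
    (q r s q' r' : Int) (fB : Nat) (batches : List (List Int)) (cb : List Int)
    (hfold : List.foldl pvIncr (stateVec n q r) cb = stateVec n q' r')
    (hp' : q * n + r + s = q' * n + r') (h0' : 0 ≤ r') (hrn' : r' < n) (hq' : 0 ≤ q')
    (hple' : q * n + r + s ≤ n * k)
    (hf : (n * k - (q * n + r + s)).toNat < fuel) (hfB : (n * k - (q * n + r + s)).toNat ≤ fB) :
    pvOuter n k l fuel (List.foldl pvIncr (stateVec n q r) cb) (batches ++ [cb])
      = (batches ++ cb :: pvChunks n (min (max l 1) n) (n * k) fB (q * n + r + s), List.replicate n.toNat k) := by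
  rw [hfold, IH (q * n + r + s) q' r' fB (batches ++ [cb]) hp' h0' hrn' hq' hple' hf hfB]
  simp

theorem loop_main (n k l : Int) (hn : 1 ≤ n) (hk : 1 ≤ k) :
    ∀ (fuel : Nat) (p q r : Int) (fuelB : Nat) (batches : List (List Int)),
      p = q * n + r → 0 ≤ r → r < n → 0 ≤ q → p ≤ n * k →
      (n * k - p).toNat < fuel → (n * k - p).toNat ≤ fuelB →
      pvOuter n k l fuel (stateVec n q r) batches
        = (batches ++ pvChunks n (min (max l 1) n) (n * k) fuelB p, List.replicate n.toNat k) := by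
  intro fuel
  induction fuel with
  | zero => intro p q r fuelB batches _ _ _ _ _ hf _; omega
  | succ fuel ih =>
    intro p q r fuelB batches hp h0 hrn hq hple hf hfB
    subst hp
    by_cases hend : q * n + r = n * k
    · -- loop exit: all counts are k
      have hr0 : (k - q) * n = r := by linear_combination -hend
      have hkq : q = k := by
        rcases lt_trichotomy q k with hlt | heq | hgt
        · have h1 : 1 * n ≤ (k - q) * n := mul_le_mul_of_nonneg_right (by omega) (by omega)
          rw [hr0] at h1; omega
        · exact heq
        · have h1 : (k - q) * n ≤ (-1) * n := mul_le_mul_of_nonneg_right (by omega) (by omega)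
          rw [hr0] at h1; omega
      subst hkq
      have hr00 : r = 0 := by rw [show (q - q) * n = 0 by ring] at hr0; omega
      subst hr00
      simp only [pvOuter, any_stateVec_false, Bool.false_eq_true, if_false]
      rw [pvChunks_stop n _ _ _ (by omega) fuelB, stateVec_zero n q (by omega)]
      simp
    · have hplt : q * n + r < n * k := lt_of_le_of_ne hple hend
      have hqk : q < k := by
        by_contra hcon
        have h2 : (k - q) * n ≤ 0 := mul_nonpos_of_nonpos_of_nonneg (by omega) (by omega)
        have hid : (k - q) * n = n * k - q * n := by ring
        linarith
      obtain ⟨T, hT⟩ : ∃ T, n * k - (q * n + r) = T := ⟨_, rfl⟩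
      have hT1 : 1 ≤ T := by omega
      have hM1 : (1 : Int) ≤ max l 1 := le_max_right l 1
      have hLM : (((max l 1).toNat : Int)) = max l 1 := Int.toNat_of_nonneg (by omega)
      -- the generic step, shared by all cases: cb known as ranges, new state normalized
      obtain ⟨fB, rfl⟩ : ∃ fB, fuelB = fB + 1 := by
        cases fuelB with
        | zero => rw [hT] at hfB; omega
        | succ f => exact ⟨f, rfl⟩
      simp only [pvOuter, any_stateVec_true n q r k h0 hrn hqk, if_true,
        sorted_stateVec n q r h0 (le_of_lt hrn)]
      simp only [pvChunks, if_pos hplt, hT]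
      set M := max l 1 with hMdef
      set s : Int := min (min M n) T with hs
      have hs1 : 1 ≤ s := by omega
      have hsn : s ≤ n := by omega
      have hps_le : q * n + r + s ≤ n * k := by omega
      have hfs : (n * k - (q * n + r + s)).toNat < fuel := by
        have he : n * k - (q * n + r + s) = T - s := by omega
        rw [he]; rw [hT] at hf; omega
      have hfBs : (n * k - (q * n + r + s)).toNat ≤ fB := by
        have he : n * k - (q * n + r + s) = T - s := by omega
        rw [he]; rw [hT] at hfB; omega
      have hTid : n * k - (q * n + r) = (k - q) * n - r := by ring
      by_cases hc : q + 1 = k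
      · -- last pass: only the tail [r, n) of the cycle is still below k
        have hTA : T = n - r := by rw [← hT, hTid, ← hc]; ring
        have hcb : pvInner (stateVec n q r) k l (PySem.List.pyRange r n ++ PySem.List.pyRange 0 r) []
            = PySem.List.pyRange r (r + s) := by
          rw [pvInner_take (stateVec n q r) k l (PySem.List.pyRange 0 r) ?hbad (PySem.List.pyRange r n) []
              (PySem.List.nodup_pyRange_one r n) ?hgood (by simp) (by simp only [List.length_nil]; omega)]
          case hbad =>
            intro i hi
            rw [PySem.List.mem_pyRange_one] at hi
            rw [getD_stateVec n q r i (by omega) (by omega), if_pos hi.2]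
            omega
          case hgood =>
            intro i hi
            rw [PySem.List.mem_pyRange_one] at hi
            rw [getD_stateVec n q r i (by omega) (by omega), if_neg (by omega)]
            omega
          rw [List.nil_append, List.length_nil, Nat.sub_zero, take_pyRange r n _ (by omega)]
          rw [← hMdef]
          congr 1
          omega
        rw [hcb, if_neg (by rw [PySem.List.pyRange_one_cons (by omega)]; simp)]
        rw [chunk_no_wrap n q r s h0 (by omega) (by omega) (by omega)]
        by_cases hw : r + s < n
        · exact pvStep_close n k l fuel ih q r s q (r + s) fB batches _
            (foldl_pvIncr n q r (r + s) h0 (by omega) (by omega))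
            (by ring) (by omega) hw (by omega) hps_le hfs hfBs
        · have hrsn : r + s = n := by omega
          exact pvStep_close n k l fuel ih q r s (q + 1) 0 fB batches _
            (by rw [foldl_pvIncr n q r (r + s) h0 (by omega) (by omega), hrsn, stateVec_wrap])
            (by linear_combination hrsn) le_rfl (by omega) (by omega) hps_le hfs hfBs
      · -- at least two passes left: the whole cycle is eligible
        have hc2 : q + 1 < k := by omega
        have h2n : 2 * n ≤ (k - q) * n := mul_le_mul_of_nonneg_right (by omega) (by omega)
        have hTB : n + 1 ≤ T := by omega
        have hcb0 := pvInner_take (stateVec n q r) k l [] (by simp)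
          (PySem.List.pyRange r n ++ PySem.List.pyRange 0 r) [] ?nodup ?good (by simp) (by simp only [List.length_nil]; omega)
        case nodup =>
          refine (PySem.List.nodup_pyRange_one r n).append (PySem.List.nodup_pyRange_one 0 r) ?_
          intro a ha hb
          rw [PySem.List.mem_pyRange_one] at ha hb
          omega
        case good =>
          intro i hi
          rw [List.mem_append, PySem.List.mem_pyRange_one, PySem.List.mem_pyRange_one] at hi
          rcases hi with hi | hi
          · rw [getD_stateVec n q r i (by omega) (by omega), if_neg (by omega)]; omega
          · rw [getD_stateVec n q r i (by omega) (by omega), if_pos (by omega)]; omega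
        rw [List.append_nil, List.nil_append, List.length_nil, Nat.sub_zero, List.take_append,
          take_pyRange r n _ (by omega), take_pyRange 0 r _ h0,
          PySem.List.length_pyRange_one, ← hMdef] at hcb0
        by_cases hw : r + s ≤ n
        · rw [show min (r + (M.toNat : Int)) n = r + s by omega,
              show min ((0:Int) + ((M.toNat - (n - r).toNat : Nat) : Int)) r = 0 by omega,
              PySem.List.pyRange_one_eq_nil (le_refl (0:Int)), List.append_nil] at hcb0
          rw [hcb0, if_neg (by rw [PySem.List.pyRange_one_cons (by omega)]; simp)]
          rw [chunk_no_wrap n q r s h0 (by omega) (by omega) (by omega)]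
          by_cases hw2 : r + s < n
          · exact pvStep_close n k l fuel ih q r s q (r + s) fB batches _
              (foldl_pvIncr n q r (r + s) h0 (by omega) (by omega))
              (by ring) (by omega) hw2 (by omega) hps_le hfs hfBs
          · have hrsn : r + s = n := by omega
            exact pvStep_close n k l fuel ih q r s (q + 1) 0 fB batches _
              (by rw [foldl_pvIncr n q r (r + s) h0 (by omega) (by omega), hrsn, stateVec_wrap])
              (by linear_combination hrsn) le_rfl (by omega) (by omega) hps_le hfs hfBs
        · rw [show min (r + (M.toNat : Int)) n = n by omega,
              show min ((0:Int) + ((M.toNat - (n - r).toNat : Nat) : Int)) r = r + s - n by omega] at hcb0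
          rw [hcb0, if_neg (by rw [PySem.List.pyRange_one_cons (by omega)]; simp)]
          rw [chunk_wrap n q r s h0 hrn hsn (by omega)]
          exact pvStep_close n k l fuel ih q r s (q + 1) (r + s - n) fB batches _
            (by rw [List.foldl_append, foldl_pvIncr n q r n h0 (by omega) le_rfl, stateVec_wrap,
                  foldl_pvIncr n (q + 1) 0 (r + s - n) le_rfl (by omega) (by omega)])
            (by ring) (by omega) (by omega) (by omega) hps_le hfs hfBs

-- ===== VERDICT (by name: the statement is the Claim_ definition above) =====
theorem greedy_assignment_spec : Claim_equal_greedy_assignment := by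
  intro n k l _
  unfold Spec_greedy_assignment greedy_assignment greedy_assignment_alt
  by_cases h : n ≤ 0 ∨ k ≤ 0
  · rw [if_pos h]
    have hany : (List.replicate n.toNat (0 : Int)).any (fun v => decide (v < k)) = false := by
      rw [List.any_eq_false]
      intro x hx
      rw [List.mem_replicate] at hx
      simp only [decide_eq_true_eq, not_lt]
      rcases h with h1 | h1
      · exact absurd (by omega : n.toNat = 0) hx.1
      · rw [hx.2]; omega
    simp [pvOuter, hany]
  · rw [if_neg h]
    have hn : 1 ≤ n := by omega
    have hk : 1 ≤ k := by omega
    rw [← stateVec_zero n 0 (by omega)]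
    have hmul : (n * k).toNat = n.toNat * k.toNat := Int.toNat_mul (by omega) (by omega)
    have := loop_main n k l hn hk (n.toNat * k.toNat + 1) 0 0 0 (n * k).toNat []
      (by ring) le_rfl hn le_rfl (by positivity)
      (by simp only [Int.sub_zero]; omega)
      (by simp only [Int.sub_zero]; exact le_rfl)
    simpa using this
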